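-- pv_equiv track=rewrite | github.com/karishmatank/ls-core | py-110/other_practice/spot_practice.py | solve
-- ===== SOURCE A (Python) =====
-- VOWELS = 'aeiou'
--
-- def solve(string):
--     longest_count = 0
--     current_count = 0
--     for char in string:
--         if char in VOWELS:
--             current_count += 1
--         else:
--             current_count = 0
--
--         if current_count >= 2:
--             longest_count = max(longest_count, current_count)
--     return longest_count
-- ===== SOURCE B (Python) =====
-- VOWELS = 'aeiou'
--
-- def solve(string):
--     # build the list of maximal vowel-run lengths, then aggregate
--     runs = []
--     i = 0
--     n = len(string)
--     while i < n:
--         if string[i] in VOWELS: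
--             j = i + 1
--             while j < n and string[j] in VOWELS:
--                 j += 1
--             runs.append(j - i)
--             i = j
--         else:
--             i += 1
--     m = max(runs, default=0)
--     return m if m >= 2 else 0
-- ===== Notes on version B (the rewrite author's own statement) =====
-- stated objective: alternative
-- what changed: Replaces the per-character accumulator scan with a two-phase decomposition: first materialize the lengths of all maximal vowel runs, then take their maximum and apply the >=2 threshold once at the end.
import Mathlib
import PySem

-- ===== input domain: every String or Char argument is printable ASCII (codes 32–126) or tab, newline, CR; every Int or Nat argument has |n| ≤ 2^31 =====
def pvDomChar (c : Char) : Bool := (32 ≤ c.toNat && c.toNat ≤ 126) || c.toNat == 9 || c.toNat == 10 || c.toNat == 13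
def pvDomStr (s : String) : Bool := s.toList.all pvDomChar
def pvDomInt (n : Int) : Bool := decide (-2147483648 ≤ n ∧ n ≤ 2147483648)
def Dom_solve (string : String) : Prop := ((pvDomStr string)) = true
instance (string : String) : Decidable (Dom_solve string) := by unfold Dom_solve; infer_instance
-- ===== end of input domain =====

-- B replaces A's per-character accumulator scan by materializing all maximal vowel-run
-- lengths and aggregating them afterwards (alternative decomposition, same cost).

-- char in VOWELS, shared literal 'aeiou'
def isVowel (c : Char) : Bool := "aeiou".toList.contains c

-- ===== PORT A =====
-- the for-loop over the string with state (longest_count, current_count)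
def solveLoop : List Char → Int → Int → Int
  | [], longest, _ => longest
  | c :: cs, longest, current =>
    let current' := if isVowel c then current + 1 else 0
    let longest' := if 2 ≤ current' then max longest current' else longest
    solveLoop cs longest' current'

def solve (string : String) : Int := solveLoop string.toList 0 0

-- ===== PORT B =====
-- the outer while-loop of Source B: lengths of the maximal vowel runs, left to right
def vowelRuns : List Char → List Int
  | [] => []
  | c :: cs =>
    if isVowel c then ((cs.takeWhile isVowel).length + 1 : Int) :: vowelRuns (cs.dropWhile isVowel)
    else vowelRuns cs
termination_by l => l.length
decreasing_by
  · have := List.length_dropWhile_le isVowel cs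
    simp; omega
  · simp

def solve_alt (string : String) : Int :=
  let m := (vowelRuns string.toList).foldl max 0   -- max(runs, default=0)
  if 2 ≤ m then m else 0

-- ===== PRECONDITION & SPEC =====
def Spec_solve (string : String) (out : Int) : Prop := out = solve_alt string
instance (string : String) (out : Int) : Decidable (Spec_solve string out) := by unfold Spec_solve; infer_instance

-- ===== CLAIM (what is proved, stated in full; the proofs are below) =====
def Claim_equal_solve : Prop := ∀ (string : String), Dom_solve string → Spec_solve string (solve string)

-- ===== LEMMAS AND PROOFS =====

-- threshold function: record a run length only when it is at least 2
def thr (x : Int) : Int := if 2 ≤ x then x else 0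

-- maximum over the run ending at the current position, extended to the right
def runMax : Int → List Char → Int
  | _, [] => 0
  | cur, c :: cs => if isVowel c then max (cur + 1) (runMax (cur + 1) cs) else runMax 0 cs

theorem thr_max (a b : Int) : thr (max a b) = max (thr a) (thr b) := by
  unfold thr; rcases le_total a b with h | h
  · rw [max_eq_right h]; split_ifs <;> omega
  · rw [max_eq_left h]; split_ifs <;> omega

-- A's accumulator distributes out of the loop (the accumulator never goes negative)
theorem solveLoop_acc (l : List Char) : ∀ longest current : Int, 0 ≤ longest →
    solveLoop l longest current = max longest (solveLoop l 0 current) := by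
  induction l with
  | nil =>
    intro longest current h
    simp only [solveLoop]
    exact (max_eq_left h).symm
  | cons c cs ih =>
    intro longest current h
    simp only [solveLoop]
    split_ifs with hv h2 h2
    · rw [ih (max longest (current + 1)) _ (le_trans h (le_max_left _ _)),
          ih (max 0 (current + 1)) _ (le_max_left _ _),
          max_eq_right (show (0:Int) ≤ current + 1 by omega), max_assoc]
    · exact ih longest _ h
    · omega
    · exact ih longest _ h

-- A's loop from a clean accumulator computes the thresholded run maximum
theorem solveLoop_runMax (l : List Char) : ∀ current : Int,
    solveLoop l 0 current = thr (runMax current l) := by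
  induction l with
  | nil => intro current; simp [solveLoop, runMax, thr]
  | cons c cs ih =>
    intro current
    simp only [solveLoop, runMax]
    by_cases hv : isVowel c
    · simp only [hv, if_true]
      rw [solveLoop_acc _ _ _ (by split_ifs <;> [exact le_max_left _ _; exact le_rfl]),
          ih, thr_max]
      congr 1
      unfold thr
      split_ifs with h1
      · exact max_eq_right (by omega)
      · rfl
    · simp only [hv, Bool.false_eq_true, if_false]
      rw [if_neg (by omega : ¬ (2:Int) ≤ 0), ih]

-- extending a positive pending run through takeWhile/dropWhile
theorem runMax_split (cs : List Char) : ∀ cur : Int, 1 ≤ cur →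
    max cur (runMax cur cs)
      = max (cur + (cs.takeWhile isVowel).length) (runMax 0 (cs.dropWhile isVowel)) := by
  induction cs with
  | nil => intro cur h; simp [runMax]
  | cons d ds ih =>
    intro cur h
    by_cases hd : isVowel d
    · simp only [runMax, List.takeWhile_cons, List.dropWhile_cons, hd, if_true]
      rw [← max_assoc, max_eq_right (show cur ≤ cur + 1 by omega), ih (cur + 1) (by omega)]
      congr 1
      simp only [List.length_cons]
      push_cast
      ring
    · simp [runMax, hd]

-- pulling an element out of a foldl max with accumulator 0
theorem foldl_max_acc (rs : List Int) : ∀ a b : Int,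
    rs.foldl max (max a b) = max a (rs.foldl max b) := by
  induction rs with
  | nil => intro a b; simp
  | cons r rs ih =>
    intro a b
    simp only [List.foldl_cons]
    rw [max_assoc, ih]

-- the clean-run maximum equals the fold over the materialized run lengths
theorem runMax_eq_foldRuns : ∀ n (l : List Char), l.length ≤ n →
    runMax 0 l = (vowelRuns l).foldl max 0 := by
  intro n
  induction n with
  | zero =>
    intro l hl
    have : l = [] := List.eq_nil_of_length_eq_zero (Nat.le_zero.mp hl)
    subst this; simp [runMax, vowelRuns]
  | succ m ih =>
    intro l hl
    match l with
    | [] => simp [runMax, vowelRuns]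
    | c :: cs =>
      simp only [List.length_cons] at hl
      by_cases h : isVowel c
      · simp only [runMax, vowelRuns, h, if_true, zero_add]
        rw [runMax_split cs 1 (by omega)]
        have hlen : (cs.dropWhile isVowel).length ≤ m := by
          have := List.length_dropWhile_le isVowel cs
          omega
        rw [List.foldl_cons, max_comm (0:Int), foldl_max_acc, ih _ hlen]
        congr 1
        omega
      · simp only [runMax, vowelRuns, h, Bool.false_eq_true, if_false]
        exact ih cs (by omega)

-- ===== VERDICT (by name: the statement is the Claim_ definition above) =====
theorem solve_spec : Claim_equal_solve := by
  intro s _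
  unfold Spec_solve solve solve_alt
  rw [solveLoop_runMax, runMax_eq_foldRuns s.toList.length s.toList (le_refl _)]
  simp only [thr]
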